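-- pv_equiv track=rewrite | github.com/rizwan2phd/zeroshot-depression-symptoms-screening-llms | scripts/category_pred.py | _extract_valid_category
-- ===== SOURCE A (Python) =====
-- def _extract_valid_category(response, categories):
--     """
--     Extract valid category from response or return None
--
--     Args:
--         response: Model output text
--         categories: List of valid categories
--
--     Returns:
--         Valid category string or None
--     """
--     if not response:
--         return None
--
--     # Clean the response - remove common artifacts
--     response_clean = response.strip().upper()
--
--     # Remove common prefixes/suffixes
--     prefixes_to_remove = ["CATEGORY:", "ANSWER:", "LABEL:", "CLASSIFICATION:"]
--     for prefix in prefixes_to_remove: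
--         if response_clean.startswith(prefix):
--             response_clean = response_clean[len(prefix):].strip()
--
--     # Remove punctuation at the end
--     response_clean = response_clean.rstrip('.,;:!?')
--
--     # Try exact match (case-insensitive)
--     for cat in categories:
--         if cat.upper() == response_clean:
--             return cat
--
--     # Try partial match in first 30 characters (stricter than before)
--     response_head = response_clean[:30]
--     for cat in categories:
--         if cat.upper() in response_head:
--             return cat
--
--     # Try word boundary match - first word only
--     words = response_clean.split()
--     if words:
--         first_word = words[0]
--         for cat in categories:
--             if cat.upper() == first_word:
--                 return cat
--
--     # Try checking if any category is a substring of first word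
--     if words:
--         first_word = words[0]
--         for cat in categories:
--             if cat.upper() in first_word or first_word in cat.upper():
--                 return cat
--
--     # No valid category found
--     return None
-- ===== SOURCE B (Python) =====
-- def _clean(response):
--     """Normalize the response: strip/upper, drop leading label prefixes, drop trailing punctuation."""
--     response_clean = response.strip().upper()
--     for prefix in ["CATEGORY:", "ANSWER:", "LABEL:", "CLASSIFICATION:"]:
--         if response_clean.startswith(prefix):
--             response_clean = response_clean[len(prefix):].strip()
--     return response_clean.rstrip('.,;:!?')
--
--
-- def _category_tier(cat, response_clean, response_head, first_word):
--     """Lowest match tier this category reaches (1 best .. 4 weakest), or None."""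
--     cu = cat.upper()
--     if cu == response_clean:
--         return 1
--     if cu in response_head:
--         return 2
--     if first_word is not None:
--         if cu == first_word:
--             return 3
--         if cu in first_word or first_word in cu:
--             return 4
--     return None
--
--
-- def _extract_valid_category(response, categories):
--     if not response:
--         return None
--     response_clean = _clean(response)
--     response_head = response_clean[:30]
--     words = response_clean.split()
--     first_word = words[0] if words else None
--     best = None  # (tier, category), earliest category of the lowest tier
--     for cat in categories:
--         tier = _category_tier(cat, response_clean, response_head, first_word)
--         if tier is None:
--             continue
--         if best is None or tier < best[0]:
--             best = (tier, cat)
--     return best[1] if best else None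
-- ===== Notes on version B (the rewrite author's own statement) =====
-- stated objective: alternative
-- what changed: Replaces A's four sequential full passes over categories (exact, head-substring, first-word, substring-of-first-word) by a single loop that assigns each category its lowest match tier and keeps the earliest category of the minimum tier.
import Mathlib
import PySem

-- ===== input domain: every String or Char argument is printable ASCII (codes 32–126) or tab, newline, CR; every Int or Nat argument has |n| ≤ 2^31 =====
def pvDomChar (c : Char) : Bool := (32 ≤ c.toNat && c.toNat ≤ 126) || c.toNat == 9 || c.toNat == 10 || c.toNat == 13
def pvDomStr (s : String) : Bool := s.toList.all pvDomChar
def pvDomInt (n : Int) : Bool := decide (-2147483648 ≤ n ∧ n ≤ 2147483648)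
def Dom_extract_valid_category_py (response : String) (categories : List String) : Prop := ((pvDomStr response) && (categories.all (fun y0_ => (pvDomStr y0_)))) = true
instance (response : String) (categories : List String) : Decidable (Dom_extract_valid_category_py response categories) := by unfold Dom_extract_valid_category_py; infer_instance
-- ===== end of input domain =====

-- B replaces A's four sequential matching passes by one loop that assigns each category
-- its lowest match tier and keeps the earliest category of the lowest tier (objective: alternative).

-- ===== PORT A =====
-- exact hand port of Python's s.rstrip('.,;:!?') (PySem has no rstrip-with-chars)
def pvRstripPunct (cs : List Char) : List Char :=
  (cs.reverse.dropWhile (fun c => ".,;:!?".toList.contains c)).reverse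

def extract_valid_category_py (response : String) (categories : List String) : Option String :=
  if response == "" then none
  else
    let rc0 := PySem.Chars.upper (PySem.Chars.strip response.toList)
    let prefixes : List (List Char) :=
      ["CATEGORY:".toList, "ANSWER:".toList, "LABEL:".toList, "CLASSIFICATION:".toList]
    let rc1 := prefixes.foldl (fun rc p =>
      if PySem.Chars.startswith rc p then
        PySem.Chars.strip (PySem.Chars.slice rc (some (p.length : Int)) none)
      else rc) rc0
    let rc := pvRstripPunct rc1
    match categories.find? (fun cat => PySem.Chars.upper cat.toList == rc) with
    | some c => some c
    | none =>
      let head := PySem.Chars.slice rc none (some 30)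
      match categories.find? (fun cat => PySem.Chars.isIn (PySem.Chars.upper cat.toList) head) with
      | some c => some c
      | none =>
        match PySem.Chars.split₀ rc with
        | [] => none
        | fw :: _ =>
          match categories.find? (fun cat => PySem.Chars.upper cat.toList == fw) with
          | some c => some c
          | none =>
            categories.find? (fun cat =>
              PySem.Chars.isIn (PySem.Chars.upper cat.toList) fw
              || PySem.Chars.isIn fw (PySem.Chars.upper cat.toList))

-- ===== PORT B =====
def pvCleanB (response : String) : List Char :=
  let rc0 := PySem.Chars.upper (PySem.Chars.strip response.toList)
  let prefixes : List (List Char) :=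
    ["CATEGORY:".toList, "ANSWER:".toList, "LABEL:".toList, "CLASSIFICATION:".toList]
  let rc1 := prefixes.foldl (fun rc p =>
    if PySem.Chars.startswith rc p then
      PySem.Chars.strip (PySem.Chars.slice rc (some (p.length : Int)) none)
    else rc) rc0
  pvRstripPunct rc1

def pvCategoryTier (cat : String) (rc head : List Char) (first? : Option (List Char)) : Option Nat :=
  let cu := PySem.Chars.upper cat.toList
  if cu == rc then some 1
  else if PySem.Chars.isIn cu head then some 2
  else
    match first? with
    | none => none
    | some fw =>
      if cu == fw then some 3
      else if PySem.Chars.isIn cu fw || PySem.Chars.isIn fw cu then some 4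
      else none

def extract_valid_category_py_alt (response : String) (categories : List String) : Option String :=
  if response == "" then none
  else
    let rc := pvCleanB response
    let head := PySem.Chars.slice rc none (some 30)
    let first? := (PySem.Chars.split₀ rc).head?
    (categories.foldl (fun b cat =>
      match pvCategoryTier cat rc head first? with
      | none => b
      | some t =>
        match b with
        | none => some (t, cat)
        | some (t0, c0) => if t < t0 then some (t, cat) else some (t0, c0)) none).map (·.2)

-- ===== PRECONDITION & SPEC =====
def Spec_extract_valid_category_py (response : String) (categories : List String) (out : Option String) : Prop := out = extract_valid_category_py_alt response categories
instance (response : String) (categories : List String) (out : Option String) : Decidable (Spec_extract_valid_category_py response categories out) := by unfold Spec_extract_valid_category_py; infer_instance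

-- ===== CLAIM (what is proved, stated in full; the proofs are below) =====
def Claim_equal_extract_valid_category_py : Prop := ∀ (response : String) (categories : List String), Dom_extract_valid_category_py response categories → Spec_extract_valid_category_py response categories (extract_valid_category_py response categories)


-- ===== LEMMAS AND PROOFS =====

-- "best so far" merge: keep the earlier entry unless the new one has a strictly lower tier
def pvMerge (b x : Option (Nat × String)) : Option (Nat × String) :=
  match b, x with
  | none, x => x
  | some b, none => some b
  | some (t0, c0), some (t, c) => if t < t0 then some (t, c) else some (t0, c0)

-- head-recursive form of B's loop result
def pvG (rc head : List Char) (first? : Option (List Char)) : List String → Option (Nat × String)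
  | [] => none
  | c :: cs => pvMerge ((pvCategoryTier c rc head first?).map (fun t => (t, c))) (pvG rc head first? cs)

theorem pvMerge_assoc (a b c : Option (Nat × String)) :
    pvMerge (pvMerge a b) c = pvMerge a (pvMerge b c) := by
  rcases a with _ | ⟨ta, ca⟩ <;> rcases b with _ | ⟨tb, cb⟩ <;> rcases c with _ | ⟨tc, cc⟩ <;>
    simp only [pvMerge] <;> split_ifs <;>
      first | rfl | (simp only [pvMerge]; split_ifs <;> first | rfl | omega)

theorem pvFoldl_eq_merge_pvG (rc head : List Char) (first? : Option (List Char))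
    (cs : List String) (b : Option (Nat × String)) :
    cs.foldl (fun b cat =>
      match pvCategoryTier cat rc head first? with
      | none => b
      | some t =>
        match b with
        | none => some (t, cat)
        | some (t0, c0) => if t < t0 then some (t, cat) else some (t0, c0)) b
    = pvMerge b (pvG rc head first? cs) := by
  induction cs generalizing b with
  | nil => cases b <;> rfl
  | cons c cs ih =>
    have hstep : (match pvCategoryTier c rc head first? with
      | none => b
      | some t =>
        match b with
        | none => some (t, c)
        | some (t0, c0) => if t < t0 then some (t, c) else some (t0, c0))
      = pvMerge b ((pvCategoryTier c rc head first?).map (fun t => (t, c))) := by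
      rcases pvCategoryTier c rc head first? with _ | t <;> rcases b with _ | ⟨t0, c0⟩ <;> rfl
    simp only [List.foldl_cons, hstep, pvG, ih, pvMerge_assoc]

theorem pvTier_bounds {cat : String} {rc head : List Char} {first? : Option (List Char)} {t : Nat}
    (h : pvCategoryTier cat rc head first? = some t) : 1 ≤ t ∧ t ≤ 4 := by
  unfold pvCategoryTier at h
  rcases first? with _ | fw <;> simp only [] at h <;> split_ifs at h <;>
    simp only [Option.some.injEq] at h <;> omega

theorem pvG_none {rc head : List Char} {first? : Option (List Char)} {cs : List String}
    (h : pvG rc head first? cs = none) :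
    ∀ x ∈ cs, pvCategoryTier x rc head first? = none := by
  induction cs with
  | nil => simp
  | cons d cs ih =>
    simp only [pvG] at h
    rcases hd : pvCategoryTier d rc head first? with _ | td <;> rw [hd] at h <;>
      rcases hg : pvG rc head first? cs with _ | ⟨tg, cg⟩ <;> rw [hg] at h <;>
        simp only [pvMerge, Option.map_none, Option.map_some] at h
    · intro x hx; rcases List.mem_cons.mp hx with rfl | hx
      · exact hd
      · exact ih hg x hx
    · cases h
    · cases h
    · split at h <;> cases h

theorem pvG_min {rc head : List Char} {first? : Option (List Char)} :
    ∀ {cs : List String} {t : Nat} {c : String}, pvG rc head first? cs = some (t, c) →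
    (c ∈ cs ∧ pvCategoryTier c rc head first? = some t)
    ∧ ∀ x ∈ cs, ∀ t', pvCategoryTier x rc head first? = some t' → t ≤ t' := by
  intro cs
  induction cs with
  | nil => intro t c h; cases h
  | cons d cs ih =>
    intro t c h
    simp only [pvG] at h
    rcases hd : pvCategoryTier d rc head first? with _ | td <;> rw [hd] at h <;>
      rcases hg : pvG rc head first? cs with _ | ⟨tg, cg⟩ <;> rw [hg] at h <;>
        simp only [pvMerge, Option.map_none, Option.map_some] at h
    · cases h
    · obtain ⟨ht, hc⟩ : tg = t ∧ cg = c := by cases h; exact ⟨rfl, rfl⟩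
      subst ht; subst hc
      obtain ⟨⟨hmem, htc⟩, hmin⟩ := ih hg
      refine ⟨⟨List.mem_cons_of_mem _ hmem, htc⟩, ?_⟩
      intro x hx t' ht'
      rcases List.mem_cons.mp hx with rfl | hx
      · rw [hd] at ht'; cases ht'
      · exact hmin x hx t' ht'
    · obtain ⟨ht, hc⟩ : td = t ∧ d = c := by cases h; exact ⟨rfl, rfl⟩
      subst ht; subst hc
      refine ⟨⟨List.mem_cons_self, hd⟩, ?_⟩
      intro x hx t' ht'
      rcases List.mem_cons.mp hx with rfl | hx
      · rw [hd] at ht'; cases ht'; omega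
      · rw [pvG_none hg x hx] at ht'; cases ht'
    · split at h
      · obtain ⟨ht, hc⟩ : tg = t ∧ cg = c := by cases h; exact ⟨rfl, rfl⟩
        subst ht; subst hc
        obtain ⟨⟨hmem, htc⟩, hmin⟩ := ih hg
        refine ⟨⟨List.mem_cons_of_mem _ hmem, htc⟩, ?_⟩
        intro x hx t' ht'
        rcases List.mem_cons.mp hx with rfl | hx
        · rw [hd] at ht'; cases ht'; omega
        · exact hmin x hx t' ht'
      · obtain ⟨ht, hc⟩ : td = t ∧ d = c := by cases h; exact ⟨rfl, rfl⟩
        subst ht; subst hc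
        obtain ⟨⟨_, _⟩, hmin⟩ := ih hg
        refine ⟨⟨List.mem_cons_self, hd⟩, ?_⟩
        intro x hx t' ht'
        rcases List.mem_cons.mp hx with rfl | hx
        · rw [hd] at ht'; cases ht'; omega
        · exact le_trans (by omega) (hmin x hx t' ht')

-- find? over a member-wise equal predicate
theorem pvFind?_congr_mem {p q : String → Bool} {cs : List String}
    (h : ∀ x ∈ cs, p x = q x) : cs.find? p = cs.find? q := by
  induction cs with
  | nil => rfl
  | cons c cs ih =>
    simp only [List.find?_cons, h c (by simp)]
    split
    · rfl
    · exact ih (fun x hx => h x (by simp [hx]))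

theorem pvAuxT (rc head : List Char) (first? : Option (List Char)) (k : Nat) :
    ∀ (cs : List String),
    (∀ x ∈ cs, ∀ t, pvCategoryTier x rc head first? = some t → k ≤ t) →
    cs.find? (fun c => pvCategoryTier c rc head first? == some k)
      = (pvG rc head first? cs).bind (fun p => if p.1 = k then some p.2 else none) := by
  intro cs
  induction cs with
  | nil => intro _; rfl
  | cons d cs ih =>
    intro h
    have hcs : ∀ x ∈ cs, ∀ t, pvCategoryTier x rc head first? = some t → k ≤ t :=
      fun x hx => h x (List.mem_cons_of_mem _ hx)
    simp only [List.find?_cons, pvG]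
    rcases hd : pvCategoryTier d rc head first? with _ | td
    · rw [show ((none : Option Nat) == some k) = false from rfl]
      simpa using ih hcs
    · by_cases hk : td = k
      · subst hk
        rw [show ((some td : Option Nat) == some td) = true by simp]
        rcases hg : pvG rc head first? cs with _ | ⟨tg, cg⟩
        · simp [pvMerge]
        · have htg : td ≤ tg := hcs cg (pvG_min hg).1.1 tg (pvG_min hg).1.2
          simp only [Option.map_some, pvMerge]
          rw [if_neg (by omega)]
          simp
      · have hkd : k < td := lt_of_le_of_ne (h d (List.mem_cons_self ..) td hd)
          (fun he => hk he.symm)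
        rw [show ((some td : Option Nat) == some k) = false by simp [hk]]
        rw [ih hcs]
        rcases hg : pvG rc head first? cs with _ | ⟨tg, cg⟩
        · simp [pvMerge, hk]
        · have htg : k ≤ tg := hcs cg (pvG_min hg).1.1 tg (pvG_min hg).1.2
          simp only [Option.map_some, pvMerge]
          split
          · rfl
          · rename_i hnlt
            have h1 : tg ≠ k := by omega
            simp [h1, hk]

-- tier-level bridges: what pvCategoryTier says about each raw predicate
theorem pvTier_one (cat : String) (rc head : List Char) (first? : Option (List Char)) :
    (pvCategoryTier cat rc head first? == some 1) = (PySem.Chars.upper cat.toList == rc) := by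
  unfold pvCategoryTier
  rcases first? with _ | fw <;> simp only [] <;> split_ifs <;> simp_all

theorem pvTier_two (cat : String) (rc head : List Char) (first? : Option (List Char))
    (h1 : (PySem.Chars.upper cat.toList == rc) = false) :
    (pvCategoryTier cat rc head first? == some 2)
      = PySem.Chars.isIn (PySem.Chars.upper cat.toList) head := by
  unfold pvCategoryTier
  rcases first? with _ | fw <;> simp only [h1, Bool.false_eq_true, if_false] <;>
    split_ifs <;> simp_all

theorem pvTier_three (cat : String) (rc head fw : List Char)
    (h1 : (PySem.Chars.upper cat.toList == rc) = false)
    (h2 : PySem.Chars.isIn (PySem.Chars.upper cat.toList) head = false) :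
    (pvCategoryTier cat rc head (some fw) == some 3) = (PySem.Chars.upper cat.toList == fw) := by
  unfold pvCategoryTier
  simp only [h1, h2, Bool.false_eq_true, if_false]
  split_ifs <;> simp_all

theorem pvTier_four (cat : String) (rc head fw : List Char)
    (h1 : (PySem.Chars.upper cat.toList == rc) = false)
    (h2 : PySem.Chars.isIn (PySem.Chars.upper cat.toList) head = false)
    (h3 : (PySem.Chars.upper cat.toList == fw) = false) :
    (pvCategoryTier cat rc head (some fw) == some 4)
      = (PySem.Chars.isIn (PySem.Chars.upper cat.toList) fw
         || PySem.Chars.isIn fw (PySem.Chars.upper cat.toList)) := by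
  unfold pvCategoryTier
  simp only [h1, h2, h3, Bool.false_eq_true, if_false]
  split_ifs <;> simp_all

theorem pvTier_le_two_of_none {cat : String} {rc head : List Char} {t : Nat}
    (h : pvCategoryTier cat rc head none = some t) : t ≤ 2 := by
  unfold pvCategoryTier at h
  dsimp only at h
  split_ifs at h <;> simp only [Option.some.injEq] at h <;> omega

theorem pvTier_first_of_ge_three {cat : String} {rc head : List Char}
    {first? : Option (List Char)} {t : Nat}
    (h : pvCategoryTier cat rc head first? = some t) (h3 : 3 ≤ t) :
    ∃ fw, first? = some fw := by
  rcases first? with _ | fw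
  · have := pvTier_le_two_of_none h; omega
  · exact ⟨fw, rfl⟩

-- the central equivalence: A's four cascaded passes equal the minimum-tier scan
theorem pvMain (rc head : List Char) (first? : Option (List Char)) (cs : List String) :
    (match cs.find? (fun cat => PySem.Chars.upper cat.toList == rc) with
     | some c => some c
     | none =>
       match cs.find? (fun cat => PySem.Chars.isIn (PySem.Chars.upper cat.toList) head) with
       | some c => some c
       | none =>
         match first? with
         | none => none
         | some fw =>
           match cs.find? (fun cat => PySem.Chars.upper cat.toList == fw) with
           | some c => some c
           | none =>
             cs.find? (fun cat => PySem.Chars.isIn (PySem.Chars.upper cat.toList) fw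
               || PySem.Chars.isIn fw (PySem.Chars.upper cat.toList)))
    = (pvG rc head first? cs).map (fun p => p.2) := by
  have hf1 : cs.find? (fun cat => PySem.Chars.upper cat.toList == rc)
      = cs.find? (fun c => pvCategoryTier c rc head first? == some 1) :=
    pvFind?_congr_mem (fun x _ => (pvTier_one x rc head first?).symm)
  rcases hg : pvG rc head first? cs with _ | ⟨t, c⟩
  · -- no category matches at any tier: every pass finds nothing
    have hnone := pvG_none hg
    have h1f : ∀ x ∈ cs, (PySem.Chars.upper x.toList == rc) = false := by
      intro x hx
      rw [← pvTier_one x rc head first?, hnone x hx]; rfl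
    have e1 : cs.find? (fun cat => PySem.Chars.upper cat.toList == rc) = none :=
      List.find?_eq_none.mpr (fun x hx => by simp [h1f x hx])
    rw [e1]
    have h2f : ∀ x ∈ cs, PySem.Chars.isIn (PySem.Chars.upper x.toList) head = false := by
      intro x hx
      rw [← pvTier_two x rc head first? (h1f x hx), hnone x hx]; rfl
    have e2 : cs.find? (fun cat => PySem.Chars.isIn (PySem.Chars.upper cat.toList) head) = none :=
      List.find?_eq_none.mpr (fun x hx => by simp [h2f x hx])
    rw [e2]
    dsimp only
    rcases first? with _ | fw
    · rfl
    · dsimp only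
      have h3f : ∀ x ∈ cs, (PySem.Chars.upper x.toList == fw) = false := by
        intro x hx
        rw [← pvTier_three x rc head fw (h1f x hx) (h2f x hx), hnone x hx]; rfl
      have e3 : cs.find? (fun cat => PySem.Chars.upper cat.toList == fw) = none :=
        List.find?_eq_none.mpr (fun x hx => by simp [h3f x hx])
      rw [e3]
      have h4f : ∀ x ∈ cs, (PySem.Chars.isIn (PySem.Chars.upper x.toList) fw
          || PySem.Chars.isIn fw (PySem.Chars.upper x.toList)) = false := by
        intro x hx
        rw [← pvTier_four x rc head fw (h1f x hx) (h2f x hx) (h3f x hx), hnone x hx]; rfl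
      have e4 : cs.find? (fun cat => PySem.Chars.isIn (PySem.Chars.upper cat.toList) fw
          || PySem.Chars.isIn fw (PySem.Chars.upper cat.toList)) = none :=
        List.find?_eq_none.mpr (fun x hx => by simp [h4f x hx])
      rw [e4]
      rfl
  · obtain ⟨⟨hmem, htier⟩, hmin⟩ := pvG_min hg
    have hge1 : ∀ x ∈ cs, ∀ t', pvCategoryTier x rc head first? = some t' → 1 ≤ t' :=
      fun x hx t' h' => (pvTier_bounds h').1
    have e1 := pvAuxT rc head first? 1 cs hge1
    rw [hg] at e1
    simp only [Option.bind_some] at e1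
    rw [hf1, e1]
    by_cases h1 : t = 1
    · subst h1; simp
    · rw [if_neg h1]
      dsimp only
      have h1f : ∀ x ∈ cs, (PySem.Chars.upper x.toList == rc) = false := by
        intro x hx
        have hno := List.find?_eq_none.mp (by rw [e1, if_neg h1]) x hx
        rw [← pvTier_one x rc head first?]
        simpa using hno
      have hge2 : ∀ x ∈ cs, ∀ t', pvCategoryTier x rc head first? = some t' → 2 ≤ t' := by
        intro x hx t' h'
        rcases Nat.lt_or_ge t' 2 with hlt | hge
        · exfalso
          have : t' = 1 := by have := (pvTier_bounds h').1; omega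
          subst this
          have hone := pvTier_one x rc head first?
          rw [h', h1f x hx] at hone
          simp at hone
        · exact hge
      have hf2 : cs.find? (fun cat => PySem.Chars.isIn (PySem.Chars.upper cat.toList) head)
          = cs.find? (fun c => pvCategoryTier c rc head first? == some 2) :=
        pvFind?_congr_mem (fun x hx => (pvTier_two x rc head first? (h1f x hx)).symm)
      have e2 := pvAuxT rc head first? 2 cs hge2
      rw [hg] at e2
      simp only [Option.bind_some] at e2
      rw [hf2, e2]
      by_cases h2 : t = 2
      · subst h2; simp
      · rw [if_neg h2]
        dsimp only
        have h2f : ∀ x ∈ cs, PySem.Chars.isIn (PySem.Chars.upper x.toList) head = false := by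
          intro x hx
          have hno := List.find?_eq_none.mp (by rw [e2, if_neg h2]) x hx
          rw [← pvTier_two x rc head first? (h1f x hx)]
          simpa using hno
        have hge3 : ∀ x ∈ cs, ∀ t', pvCategoryTier x rc head first? = some t' → 3 ≤ t' := by
          intro x hx t' h'
          rcases Nat.lt_or_ge t' 3 with hlt | hge
          · exfalso
            have h2le := hge2 x hx t' h'
            have : t' = 2 := by omega
            subst this
            have htwo := pvTier_two x rc head first? (h1f x hx)
            rw [h', h2f x hx] at htwo
            simp at htwo
          · exact hge
        have ht3 : 3 ≤ t := hge3 c hmem t htier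
        obtain ⟨fw, hfw⟩ := pvTier_first_of_ge_three htier ht3
        subst hfw
        dsimp only
        have hf3 : cs.find? (fun cat => PySem.Chars.upper cat.toList == fw)
            = cs.find? (fun c => pvCategoryTier c rc head (some fw) == some 3) :=
          pvFind?_congr_mem (fun x hx => (pvTier_three x rc head fw (h1f x hx) (h2f x hx)).symm)
        have e3 := pvAuxT rc head (some fw) 3 cs hge3
        rw [hg] at e3
        simp only [Option.bind_some] at e3
        rw [hf3, e3]
        by_cases h3 : t = 3
        · subst h3; simp
        · rw [if_neg h3]
          dsimp only
          have h3f : ∀ x ∈ cs, (PySem.Chars.upper x.toList == fw) = false := by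
            intro x hx
            have hno := List.find?_eq_none.mp (by rw [e3, if_neg h3]) x hx
            rw [← pvTier_three x rc head fw (h1f x hx) (h2f x hx)]
            simpa using hno
          have hge4 : ∀ x ∈ cs, ∀ t', pvCategoryTier x rc head (some fw) = some t' → 4 ≤ t' := by
            intro x hx t' h'
            rcases Nat.lt_or_ge t' 4 with hlt | hge
            · exfalso
              have h3le := hge3 x hx t' h'
              have : t' = 3 := by omega
              subst this
              have hthree := pvTier_three x rc head fw (h1f x hx) (h2f x hx)
              rw [h', h3f x hx] at hthree
              simp at hthree
            · exact hge
          have ht4' : t = 4 := by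
            have h4le := hge4 c hmem t htier
            have := (pvTier_bounds htier).2
            omega
          subst ht4'
          have hf4 : cs.find? (fun cat => PySem.Chars.isIn (PySem.Chars.upper cat.toList) fw
              || PySem.Chars.isIn fw (PySem.Chars.upper cat.toList))
              = cs.find? (fun c => pvCategoryTier c rc head (some fw) == some 4) :=
            pvFind?_congr_mem (fun x hx =>
              (pvTier_four x rc head fw (h1f x hx) (h2f x hx) (h3f x hx)).symm)
          have e4 := pvAuxT rc head (some fw) 4 cs hge4
          rw [hg] at e4
          simp only [Option.bind_some] at e4
          rw [hf4, e4]
          simp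

-- ===== VERDICT (by name: the statement is the Claim_ definition above) =====
theorem extract_valid_category_py_spec : Claim_equal_extract_valid_category_py := by
  intro response categories _
  unfold Spec_extract_valid_category_py extract_valid_category_py extract_valid_category_py_alt pvCleanB
  by_cases h : response == ""
  · simp [h]
  · simp only [h, Bool.false_eq_true, if_false]
    rw [pvFoldl_eq_merge_pvG]
    generalize pvRstripPunct
      ((["CATEGORY:".toList, "ANSWER:".toList, "LABEL:".toList, "CLASSIFICATION:".toList] :
        List (List Char)).foldl (fun rc p =>
          if PySem.Chars.startswith rc p then
            PySem.Chars.strip (PySem.Chars.slice rc (some (p.length : Int)) none)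
          else rc) (PySem.Chars.upper (PySem.Chars.strip response.toList))) = rc
    rcases hw : PySem.Chars.split₀ rc with _ | ⟨fw, ws⟩
    · exact pvMain rc (PySem.Chars.slice rc none (some 30)) none categories
    · exact pvMain rc (PySem.Chars.slice rc none (some 30)) (some fw) categories
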